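-- pv_equiv track=rewrite | github.com/amougino/magnum | magnum/oper/karatsuba.py | karatsuba_add_sub
-- ===== SOURCE A (Python) =====
-- def karatsuba_add_sub(val1, val2, operation='add'):
--     len1 = len(val1)
--     len2 = len(val2)
--
--     if len1 > len2:
--         val2 = [0 for i in range(len1 - len2)] + val2
--         len2 = len1
--     else:
--         val1 = [0 for i in range(len2 - len1)] + val1
--         len1 = len2
--
--     f = []
--     if operation == 'add':
--         for i in range(len1):
--             f.append(val1[i] + val2[i])
--     elif operation == 'sub':
--         for i in range(len1):
--             f.append(val1[i] - val2[i])
--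
--     lenf = len(f)
--     for i in range(1, lenf):
--         idx = lenf - i
--         f[idx - 1] += f[idx] // 10
--         f[idx] %= 10
--     while f[0] // 10 != 0:
--         f.insert(0, f[0] // 10)
--         f[1] %= 10
--     while f[0] == 0 and len(f) > 1:
--         f.pop(0)
--
--     return f
-- ===== SOURCE B (Python) =====
-- def karatsuba_add_sub(val1, val2, operation='add'):
--     # Interpret each digit array as the integer it denotes (Horner), combine
--     # once, then emit the decimal digits of the result.
--     n1 = 0
--     for d in val1:
--         n1 = n1 * 10 + d
--     n2 = 0
--     for d in val2:
--         n2 = n2 * 10 + d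
--     if operation == 'add':
--         n = n1 + n2
--     elif operation == 'sub':
--         n = n1 - n2
--     else:
--         raise ValueError("operation must be 'add' or 'sub'")
--     digits = []
--     while n >= 10:
--         digits.append(n % 10)
--         n //= 10
--     digits.append(n)
--     return digits[::-1]
-- ===== Notes on version B (the rewrite author's own statement) =====
-- stated objective: simpler
-- what changed: A pads the arrays, zips them element-wise, runs an indexed carry-propagation pass, an insert-at-front renormalization loop and a leading-zero strip; B instead evaluates each digit array as one integer by Horner's rule, adds/subtracts once, and emits the decimal digits of the result with a single divmod loop.
import Mathlib
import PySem

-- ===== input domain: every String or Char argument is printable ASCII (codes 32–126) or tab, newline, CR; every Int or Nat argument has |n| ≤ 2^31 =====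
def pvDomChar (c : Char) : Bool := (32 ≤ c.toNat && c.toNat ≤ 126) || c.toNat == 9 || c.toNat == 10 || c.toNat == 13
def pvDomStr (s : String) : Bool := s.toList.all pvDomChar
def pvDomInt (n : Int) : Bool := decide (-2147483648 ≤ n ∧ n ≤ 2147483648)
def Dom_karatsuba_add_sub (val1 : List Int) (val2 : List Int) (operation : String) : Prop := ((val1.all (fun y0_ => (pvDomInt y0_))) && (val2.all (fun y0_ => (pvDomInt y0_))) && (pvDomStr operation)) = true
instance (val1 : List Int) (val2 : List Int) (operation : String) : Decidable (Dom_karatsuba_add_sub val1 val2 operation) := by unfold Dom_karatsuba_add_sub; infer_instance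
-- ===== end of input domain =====

-- B replaces A's pad/zip/carry/renormalize list pipeline by one Horner evaluation of each
-- digit array followed by a single digit-extraction loop (objective: simpler; return value only).

-- ===== PORT A =====

-- Python carry loop 'for i in range(1, lenf): idx = lenf - i; f[idx-1] += f[idx] // 10; f[idx] %= 10'
-- runs idx = lenf-1 down to 1; ported as a countdown recursion on idx over the same list state.
def aCarryStep (f : List Int) (idx : Nat) : List Int :=
  let f1 := f.set (idx - 1) (f.getD (idx - 1) 0 + PySem.Int.floordiv (f.getD idx 0) 10)
  f1.set idx (PySem.Int.mod (f1.getD idx 0) 10)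

def aCarryGo : List Int → Nat → List Int
  | f, 0 => f
  | f, Nat.succ k => aCarryGo (aCarryStep f (k + 1)) k

-- Python 'while f[0] // 10 != 0: f.insert(0, f[0] // 10); f[1] %= 10', with fuel making it total;
-- the chosen fuel |f[0]|+1 suffices on every input admitted by Pre_ (proved below).
def aNormGo : Nat → List Int → List Int
  | 0, f => f
  | Nat.succ fuel, f =>
    match f with
    | [] => []
    | h :: t =>
      if PySem.Int.floordiv h 10 = 0 then h :: t
      else aNormGo fuel (PySem.Int.floordiv h 10 :: PySem.Int.mod h 10 :: t)

-- Python 'while f[0] == 0 and len(f) > 1: f.pop(0)'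
def aStrip : List Int → List Int
  | x :: y :: t => if x = 0 then aStrip (y :: t) else x :: y :: t
  | l => l

def karatsuba_add_sub (val1 : List Int) (val2 : List Int) (operation : String) : List Int :=
  let len1 := val1.length
  let len2 := val2.length
  let val1' := if len1 > len2 then val1 else List.replicate (len2 - len1) 0 ++ val1
  let val2' := if len1 > len2 then List.replicate (len1 - len2) 0 ++ val2 else val2
  let len := if len1 > len2 then len1 else len2    -- Python: both len1 and len2 become the max
  let f : List Int :=
    if operation == "add" then
      (List.range len).foldl (fun f i => f ++ [val1'.getD i 0 + val2'.getD i 0]) []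
    else if operation == "sub" then
      (List.range len).foldl (fun f i => f ++ [val1'.getD i 0 - val2'.getD i 0]) []
    else []
  let g := aCarryGo f (f.length - 1)
  match g with
  | [] => []   -- Python raises IndexError at 'f[0]' here; excluded by Pre_
  | h :: t => aStrip (aNormGo (h.natAbs + 1) (h :: t))

-- ===== PORT B =====

-- Python 'while n >= 10: digits.append(n % 10); n //= 10' then 'digits.append(n)'
def bGo (digits : List Int) (n : Int) : List Int :=
  if h : 10 ≤ n then bGo (digits ++ [PySem.Int.mod n 10]) (PySem.Int.floordiv n 10)
  else digits ++ [n]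
termination_by n.toNat
decreasing_by
  have h1 : PySem.Int.floordiv n 10 = n / 10 := PySem.Int.floordiv_eq_ediv_of_pos (by norm_num)
  rw [h1]; omega

def karatsuba_add_sub_alt (val1 : List Int) (val2 : List Int) (operation : String) : List Int :=
  let n1 := val1.foldl (fun a d => a * 10 + d) 0
  let n2 := val2.foldl (fun a d => a * 10 + d) 0
  if operation == "add" then (bGo [] (n1 + n2)).reverse
  else if operation == "sub" then (bGo [] (n1 - n2)).reverse
  else []   -- Python B raises ValueError here; excluded by Pre_

-- ===== PRECONDITION & SPEC =====

-- the integer denoted by a digit array (Horner)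
def pvVal (l : List Int) : Int := l.foldl (fun a d => a * 10 + d) 0

-- Pre_ excludes exactly the inputs on which A does not return: operations other than
-- 'add'/'sub' and two empty arrays (f is empty, so 'f[0]' raises IndexError), and
-- inputs whose combined value is negative (A's renormalization while-loop never terminates).
def Pre_karatsuba_add_sub (val1 : List Int) (val2 : List Int) (operation : String) : Prop :=
  (val1 ≠ [] ∨ val2 ≠ []) ∧
  ((operation = "add" ∧ 0 ≤ pvVal val1 + pvVal val2) ∨
   (operation = "sub" ∧ 0 ≤ pvVal val1 - pvVal val2))

instance (val1 : List Int) (val2 : List Int) (operation : String) : Decidable (Pre_karatsuba_add_sub val1 val2 operation) := by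
  unfold Pre_karatsuba_add_sub; infer_instance

def pvWitness_karatsuba_add_sub : List Int × List Int × String := ([1, 2], [3], "add")

def Spec_karatsuba_add_sub (val1 : List Int) (val2 : List Int) (operation : String) (out : List Int) : Prop := out = karatsuba_add_sub_alt val1 val2 operation
instance (val1 : List Int) (val2 : List Int) (operation : String) (out : List Int) : Decidable (Spec_karatsuba_add_sub val1 val2 operation out) := by unfold Spec_karatsuba_add_sub; infer_instance

-- ===== CLAIM (what is proved, stated in full; the proofs are below) =====
def Claim_equal_karatsuba_add_sub : Prop := ∀ (val1 : List Int) (val2 : List Int) (operation : String), Dom_karatsuba_add_sub val1 val2 operation → Pre_karatsuba_add_sub val1 val2 operation → Spec_karatsuba_add_sub val1 val2 operation (karatsuba_add_sub val1 val2 operation)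

-- ===== LEMMAS AND PROOFS =====

-- Horner value: basic equations
theorem pvVal_foldl_init (l : List Int) : ∀ a : Int,
    List.foldl (fun a d => a * 10 + d) a l = a * 10 ^ l.length + pvVal l := by
  induction l with
  | nil => intro a; simp [pvVal]
  | cons d t ih =>
    intro a
    simp only [List.foldl_cons, List.length_cons]
    rw [ih (a * 10 + d)]
    have h2 : pvVal (d :: t) = d * 10 ^ t.length + pvVal t := by
      simp only [pvVal, List.foldl_cons]
      simpa using ih d
    rw [h2]; ring

theorem pvVal_cons (d : Int) (l : List Int) :
    pvVal (d :: l) = d * 10 ^ l.length + pvVal l := by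
  simp only [pvVal, List.foldl_cons]
  simpa using pvVal_foldl_init l d

theorem pvVal_append (a b : List Int) :
    pvVal (a ++ b) = pvVal a * 10 ^ b.length + pvVal b := by
  simp only [pvVal, List.foldl_append]
  exact pvVal_foldl_init b _

theorem pvVal_replicate_zero (k : Nat) (l : List Int) :
    pvVal (List.replicate k 0 ++ l) = pvVal l := by
  rw [pvVal_append]
  have : pvVal (List.replicate k (0 : Int)) = 0 := by
    induction k with
    | zero => simp [pvVal]
    | succ m ih => rw [List.replicate_succ, pvVal_cons, ih]; ring
  rw [this]; ring

-- the f-building loop is zipWith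
theorem pvFoldlMap {α : Type} (L : List α) (f : α → Int) : ∀ init : List Int,
    L.foldl (fun acc x => acc ++ [f x]) init = init ++ L.map f := by
  induction L with
  | nil => intro init; simp
  | cons x xs ih => intro init; simp only [List.foldl_cons, List.map_cons]; rw [ih]; simp

theorem build_eq_zipWith (op : Int → Int → Int) (a b : List Int) (n : Nat)
    (ha : a.length = n) (hb : b.length = n) :
    (List.range n).foldl (fun f i => f ++ [op (a.getD i 0) (b.getD i 0)]) [] =
      List.zipWith op a b := by
  induction n generalizing a b with
  | zero =>
    have : a = [] := List.eq_nil_of_length_eq_zero ha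
    simp [this]
  | succ m ih =>
    cases a with
    | nil => simp at ha
    | cons x xs =>
      cases b with
      | nil => simp at hb
      | cons y ys =>
        have hx : xs.length = m := by simpa using ha
        have hy : ys.length = m := by simpa using hb
        rw [pvFoldlMap, List.range_succ_eq_map]
        simp only [List.map_cons, List.map_map, List.nil_append, List.zipWith_cons_cons]
        congr 1
        have ihm := ih xs ys hx hy
        rw [pvFoldlMap] at ihm
        simp only [List.nil_append] at ihm
        rw [← ihm]
        apply List.map_congr_left
        intro i _
        simp [Function.comp, List.getD_cons_succ]

theorem pvVal_zipWith_add (a b : List Int) (h : a.length = b.length) :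
    pvVal (List.zipWith (· + ·) a b) = pvVal a + pvVal b := by
  induction a generalizing b with
  | nil =>
    have : b = [] := List.eq_nil_of_length_eq_zero (by simpa using h.symm)
    simp [this, pvVal]
  | cons x xs ih =>
    cases b with
    | nil => simp at h
    | cons y ys =>
      have hl : xs.length = ys.length := by simpa using h
      simp only [List.zipWith_cons_cons]
      rw [pvVal_cons, pvVal_cons, pvVal_cons, ih ys hl]
      rw [List.length_zipWith, hl, min_self]
      ring

theorem pvVal_zipWith_sub (a b : List Int) (h : a.length = b.length) :
    pvVal (List.zipWith (· - ·) a b) = pvVal a - pvVal b := by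
  induction a generalizing b with
  | nil =>
    have : b = [] := List.eq_nil_of_length_eq_zero (by simpa using h.symm)
    simp [this, pvVal]
  | cons x xs ih =>
    cases b with
    | nil => simp at h
    | cons y ys =>
      have hl : xs.length = ys.length := by simpa using h
      simp only [List.zipWith_cons_cons]
      rw [pvVal_cons, pvVal_cons, pvVal_cons, ih ys hl]
      rw [List.length_zipWith, hl, min_self]
      ring

-- carry pass, specified on the reversed (least-significant-first) list
def dCarry : Int → List Int → List Int
  | c, [] => []
  | c, [x] => [x + c]
  | c, d :: e :: r => (d + c) % 10 :: dCarry ((d + c) / 10) (e :: r)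

theorem dCarry_length (r : List Int) : ∀ c, (dCarry c r).length = r.length := by
  induction r with
  | nil => intro c; simp [dCarry]
  | cons d t ih =>
    intro c
    cases t with
    | nil => simp [dCarry]
    | cons e r' => simp [dCarry, ih]

def vR : List Int → Int
  | [] => 0
  | d :: r => d + 10 * vR r

theorem vR_eq (l : List Int) : vR l = pvVal l.reverse := by
  induction l with
  | nil => simp [vR, pvVal]
  | cons d t ih =>
    simp only [vR, List.reverse_cons, ih]
    rw [pvVal_append]
    have : pvVal [d] = d := by simp [pvVal]
    simp [this]; ring

theorem dCarry_val (r : List Int) (hr : r ≠ []) : ∀ c, vR (dCarry c r) = vR r + c := by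
  induction r with
  | nil => exact absurd rfl hr
  | cons d t ih =>
    intro c
    cases t with
    | nil => simp only [dCarry, vR]; ring
    | cons e r' =>
      simp only [dCarry, vR]
      rw [ih (by simp) ((d + c) / 10)]
      have := Int.ediv_add_emod (d + c) 10
      simp only [vR]
      omega

theorem dCarry_bounds (r : List Int) : ∀ c, ∀ y ∈ (dCarry c r).dropLast, 0 ≤ y ∧ y < 10 := by
  induction r with
  | nil => intro c y hy; simp [dCarry] at hy
  | cons d t ih =>
    intro c y hy
    cases t with
    | nil => simp [dCarry] at hy
    | cons e r' =>
      simp only [dCarry] at hy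
      have hne : dCarry ((d + c) / 10) (e :: r') ≠ [] := by
        intro h
        have := dCarry_length (e :: r') ((d + c) / 10)
        rw [h] at this; simp at this
      rw [List.dropLast_cons_of_ne_nil hne] at hy
      rcases List.mem_cons.mp hy with h | h
      · subst h
        exact ⟨Int.emod_nonneg _ (by norm_num), Int.emod_lt_of_pos _ (by norm_num)⟩
      · exact ih _ y h

theorem aCarryStep_append (p r : List Int) (k : Nat) (h : k + 2 ≤ p.length) :
    aCarryStep (p ++ r) (k + 1) = aCarryStep p (k + 1) ++ r := by
  unfold aCarryStep
  simp only [Nat.add_sub_cancel]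
  rw [List.getD_append _ _ _ _ (by omega), List.getD_append _ _ _ _ (by omega),
      List.set_append_left _ _ (by omega)]
  rw [List.getD_append _ _ _ _ (by simp; omega), List.set_append_left _ _ (by simp; omega)]

theorem aCarryStep_length (f : List Int) (k : Nat) : (aCarryStep f k).length = f.length := by
  simp [aCarryStep]

theorem aCarryGo_append (k : Nat) : ∀ p r : List Int, k + 1 ≤ p.length →
    aCarryGo (p ++ r) k = aCarryGo p k ++ r := by
  induction k with
  | zero => intro p r _; simp [aCarryGo]
  | succ m ih =>
    intro p r hp
    simp only [aCarryGo]
    rw [aCarryStep_append p r m (by omega)]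
    exact ih _ r (by rw [aCarryStep_length]; omega)

theorem fd10 (a : Int) : PySem.Int.floordiv a 10 = a / 10 :=
  PySem.Int.floordiv_eq_ediv_of_pos (by norm_num)

theorem md10 (a : Int) : PySem.Int.mod a 10 = a % 10 :=
  PySem.Int.mod_eq_emod_of_pos (by norm_num)

theorem stepLast (m : List Int) (e z : Int) :
    aCarryStep ((m ++ [e]) ++ [z]) (m.length + 1) = (m ++ [e + z / 10]) ++ [z % 10] := by
  unfold aCarryStep
  simp only [fd10, md10, Nat.add_sub_cancel]
  have h1 : ((m ++ [e]) ++ [z]).getD m.length 0 = e := by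
    rw [List.getD_append _ _ _ _ (by simp), List.getD_append_right _ _ _ _ (by simp)]
    simp
  have h2 : ((m ++ [e]) ++ [z]).getD (m.length + 1) 0 = z := by
    rw [List.getD_append_right _ _ _ _ (by simp)]
    simp
  rw [h1, h2]
  have h3 : ((m ++ [e]) ++ [z]).set m.length (e + z / 10) = (m ++ [e + z / 10]) ++ [z] := by
    rw [List.set_append_left _ _ (by simp)]
    congr 1
    rw [List.set_append_right _ _ (by simp)]
    simp
  rw [h3]
  have h4 : ((m ++ [e + z / 10]) ++ [z]).getD (m.length + 1) 0 = z := by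
    rw [List.getD_append_right _ _ _ _ (by simp)]
    simp
  rw [h4]
  rw [List.set_append_right _ _ (by simp)]
  simp

theorem aCarryGo_main (u : List Int) : ∀ (c x : Int),
    aCarryGo (List.reverse ((x + c) :: u)) u.length = (dCarry c (x :: u)).reverse := by
  induction u with
  | nil => intro c x; simp [aCarryGo, dCarry]
  | cons e u' ih =>
    intro c x
    have hrev : List.reverse ((x + c) :: e :: u') = (u'.reverse ++ [e]) ++ [x + c] := by
      simp
    rw [hrev]
    show aCarryGo _ (u'.length + 1) = _
    simp only [aCarryGo]
    have hm : u'.length = u'.reverse.length := by simp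
    rw [show u'.length + 1 = u'.reverse.length + 1 from by simp,
        stepLast u'.reverse e (x + c)]
    rw [aCarryGo_append _ _ _ (by simp)]
    have hrw : u'.reverse ++ [e + (x + c) / 10] = List.reverse ((e + (x + c) / 10) :: u') := by
      simp
    rw [hrw, ih ((x + c) / 10) e]
    show _ = (dCarry c (x :: e :: u')).reverse
    simp only [dCarry]
    simp

theorem aCarryGo_eq (f : List Int) (hf : f ≠ []) :
    aCarryGo f (f.length - 1) = (dCarry 0 f.reverse).reverse := by
  obtain ⟨x, u, hx⟩ : ∃ x u, f.reverse = x :: u := by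
    cases hr : f.reverse with
    | nil => exact absurd (by simpa using congrArg List.reverse hr) hf
    | cons x u => exact ⟨x, u, rfl⟩
  have hfeq : f = List.reverse ((x + 0) :: u) := by
    rw [add_zero, ← hx, List.reverse_reverse]
  have hlen : f.length - 1 = u.length := by
    have : f.length = f.reverse.length := by simp
    rw [this, hx]; simp
  rw [hlen, hx]
  calc aCarryGo f u.length = aCarryGo (List.reverse ((x + 0) :: u)) u.length := by rw [← hfeq]
    _ = (dCarry 0 (x :: u)).reverse := aCarryGo_main u 0 x

-- B's digit loop
theorem bGo_acc (k : Nat) : ∀ (n : Int) (ds : List Int), n.toNat ≤ k →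
    bGo ds n = ds ++ bGo [] n := by
  induction k with
  | zero =>
    intro n ds h
    have h10 : ¬ 10 ≤ n := by omega
    conv_lhs => rw [bGo]
    conv_rhs => rw [bGo]
    simp [h10]
  | succ m ih =>
    intro n ds h
    by_cases h10 : 10 ≤ n
    · conv_lhs => rw [bGo]
      conv_rhs => rw [bGo]
      simp only [dif_pos h10]
      have hlt : (PySem.Int.floordiv n 10).toNat ≤ m := by rw [fd10]; omega
      rw [ih _ _ hlt, ih _ ([] ++ [PySem.Int.mod n 10]) hlt]
      simp
    · conv_lhs => rw [bGo]
      conv_rhs => rw [bGo]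
      simp [h10]

theorem bGo_step (n : Int) (h : 10 ≤ n) :
    (bGo [] n).reverse = (bGo [] (n / 10)).reverse ++ [n % 10] := by
  rw [bGo]
  simp only [h, dite_true, dif_pos]
  rw [bGo_acc (PySem.Int.floordiv n 10).toNat _ _ le_rfl]
  simp [fd10, md10]

theorem bGo_small (n : Int) (h : n < 10) : (bGo [] n).reverse = [n] := by
  rw [bGo]
  simp [show ¬ 10 ≤ n by omega]

theorem rd_val (k : Nat) : ∀ n : Int, 0 ≤ n → n.toNat ≤ k → pvVal (bGo [] n).reverse = n := by
  induction k with
  | zero =>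
    intro n hn hk
    have : n = 0 := by omega
    subst this
    rw [bGo_small 0 (by norm_num)]
    simp [pvVal]
  | succ m ih =>
    intro n hn hk
    by_cases h10 : 10 ≤ n
    · rw [bGo_step n h10, pvVal_append]
      rw [ih (n / 10) (by omega) (by omega)]
      have : pvVal [n % 10] = n % 10 := by simp [pvVal]
      rw [this]
      simp
      omega
    · rw [bGo_small n (by omega)]
      simp [pvVal]

theorem rd_bounds (k : Nat) : ∀ n : Int, 0 ≤ n → n.toNat ≤ k →
    ∀ y ∈ (bGo [] n).reverse, 0 ≤ y ∧ y < 10 := by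
  induction k with
  | zero =>
    intro n hn hk y hy
    have : n = 0 := by omega
    subst this
    rw [bGo_small 0 (by norm_num)] at hy
    simp at hy
    omega
  | succ m ih =>
    intro n hn hk y hy
    by_cases h10 : 10 ≤ n
    · rw [bGo_step n h10] at hy
      rcases List.mem_append.mp hy with h | h
      · exact ih (n / 10) (by omega) (by omega) y h
      · simp at h
        subst h
        omega
    · rw [bGo_small n (by omega)] at hy
      simp at hy
      omega

-- the normalization loop expands the head into its digits
theorem aNormGo_eq (fuel : Nat) : ∀ (h : Int) (t : List Int), 0 ≤ h → h.toNat < fuel →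
    aNormGo fuel (h :: t) = (bGo [] h).reverse ++ t := by
  induction fuel with
  | zero => intro h t _ hk; omega
  | succ m ih =>
    intro h t hh hk
    simp only [aNormGo, fd10, md10]
    by_cases h10 : 10 ≤ h
    · rw [if_neg (by omega)]
      rw [ih (h / 10) (h % 10 :: t) (by omega) (by omega)]
      rw [bGo_step h h10]
      simp
    · rw [if_pos (by omega)]
      rw [bGo_small h (by omega)]
      simp

-- digit lists are canonical
theorem pvVal_bounds (t : List Int) (ht : ∀ y ∈ t, 0 ≤ y ∧ y < 10) :
    0 ≤ pvVal t ∧ pvVal t < 10 ^ t.length := by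
  induction t with
  | nil => simp [pvVal]
  | cons d t ih =>
    obtain ⟨hd0, hd10⟩ := ht d (by simp)
    obtain ⟨h0, h1⟩ := ih (fun y hy => ht y (by simp [hy]))
    rw [pvVal_cons]
    have hp : (0:Int) < 10 ^ t.length := by positivity
    constructor
    · nlinarith
    · have : (10:Int) ^ (d :: t).length = 10 * 10 ^ t.length := by
        simp [pow_succ]; ring
      rw [this]
      nlinarith

theorem rd_canonical (l : List Int) (hd : ∀ y ∈ l, 0 ≤ y ∧ y < 10) (hne : l ≠ [])
    (hh : (∀ x, l.head? = some x → x ≠ 0) ∨ l.length = 1) :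
    (bGo [] (pvVal l)).reverse = l := by
  revert hd hne hh
  induction l using List.reverseRecOn with
  | nil => intro _ hne _; exact absurd rfl hne
  | append_singleton m e ihm =>
    intro hd hne hh
    by_cases hm : m = []
    · subst hm
      simp only [List.nil_append]
      obtain ⟨he0, he10⟩ := hd e (by simp)
      have hv : pvVal [e] = e := by simp [pvVal]
      rw [hv, bGo_small _ he10]
    · have hh' : ∀ x, m.head? = some x → x ≠ 0 := by
        rcases hh with hh | hh
        · intro x hx
          apply hh x
          rw [List.head?_append_of_ne_nil _ hm]
          exact hx
        · exfalso
          have : m.length + 1 = 1 := by simpa using hh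
          have : m.length = 0 := by omega
          exact hm (List.eq_nil_of_length_eq_zero this)
      obtain ⟨a, m', ham⟩ : ∃ a m', m = a :: m' := by
        cases m with
        | nil => exact absurd rfl hm
        | cons a m' => exact ⟨a, m', rfl⟩
      have ha : a ≠ 0 := hh' a (by rw [ham]; rfl)
      obtain ⟨ha0, ha10⟩ := hd a (by simp [ham])
      have hm'b := pvVal_bounds m' (fun y hy => hd y (by simp [ham, hy]))
      have hmval : 1 ≤ pvVal m := by
        rw [ham, pvVal_cons]
        have hp : (0:Int) < 10 ^ m'.length := by positivity
        have ha1 : 1 ≤ a := by omega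
        have hmul : (1:Int) * 10 ^ m'.length ≤ a * 10 ^ m'.length := by nlinarith
        nlinarith [hm'b.1]
      obtain ⟨he0, he10⟩ := hd e (by simp)
      have hn : pvVal (m ++ [e]) = pvVal m * 10 + e := by
        rw [pvVal_append]; simp [pvVal]
      have h10 : 10 ≤ pvVal (m ++ [e]) := by rw [hn]; omega
      rw [bGo_step _ h10]
      have hdiv : pvVal (m ++ [e]) / 10 = pvVal m := by rw [hn]; omega
      have hmod : pvVal (m ++ [e]) % 10 = e := by rw [hn]; omega
      rw [hdiv, hmod]
      rw [ihm (fun y hy => hd y (by simp [hy])) hm (Or.inl hh')]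

theorem aStrip_eq (l : List Int) (hd : ∀ y ∈ l, 0 ≤ y ∧ y < 10) (hne : l ≠ []) :
    aStrip l = (bGo [] (pvVal l)).reverse := by
  induction l with
  | nil => exact absurd rfl hne
  | cons d t ih =>
    cases t with
    | nil =>
      obtain ⟨hd0, hd10⟩ := hd d (by simp)
      have hv : pvVal [d] = d := by simp [pvVal]
      rw [hv, bGo_small _ hd10]
      simp [aStrip]
    | cons e t' =>
      by_cases hd0 : d = 0
      · subst hd0
        show aStrip (0 :: e :: t') = _
        rw [show aStrip (0 :: e :: t') = aStrip (e :: t') from by simp [aStrip]]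
        rw [ih (fun y hy => hd y (by simp [hy])) (by simp)]
        rw [show pvVal (0 :: e :: t') = pvVal (e :: t') from by rw [pvVal_cons]; ring]
      · show aStrip (d :: e :: t') = _
        rw [show aStrip (d :: e :: t') = d :: e :: t' from by simp [aStrip, hd0]]
        exact (rd_canonical (d :: e :: t') hd (by simp)
          (Or.inl (fun x hx => by simp at hx; omega))).symm

-- assembled: carry + renormalize + strip on a nonempty digit array of nonnegative value
theorem core_eq (f : List Int) (hf : f ≠ []) (hn : 0 ≤ pvVal f) :
    (match aCarryGo f (f.length - 1) with
     | [] => ([] : List Int)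
     | h :: t => aStrip (aNormGo (h.natAbs + 1) (h :: t))) = (bGo [] (pvVal f)).reverse := by
  have hrne : f.reverse ≠ [] := by simpa using hf
  set u := dCarry 0 f.reverse with hu
  have hune : u ≠ [] := by
    intro hc
    have := dCarry_length f.reverse 0
    rw [← hu, hc] at this
    exact hrne (List.eq_nil_of_length_eq_zero (by simpa using this.symm))
  have hg : aCarryGo f (f.length - 1) = u.reverse := aCarryGo_eq f hf
  have hsplit : u.dropLast ++ [u.getLast hune] = u := List.dropLast_append_getLast hune
  set h := u.getLast hune with hh
  set t := u.dropLast.reverse with ht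
  have hur : u.reverse = h :: t := by
    conv_lhs => rw [← hsplit]
    simp only [List.reverse_append, List.reverse_cons, List.reverse_nil, List.nil_append,
      List.cons_append, List.singleton_append]
    rw [← ht]
  have htb : ∀ y ∈ t, 0 ≤ y ∧ y < 10 := by
    intro y hy
    rw [ht, List.mem_reverse] at hy
    exact dCarry_bounds f.reverse 0 y hy
  have hval : pvVal (h :: t) = pvVal f := by
    rw [← hur]
    have h1 : pvVal u.reverse = vR u := (vR_eq u).symm
    rw [h1, hu, dCarry_val f.reverse hrne 0, vR_eq, List.reverse_reverse]
    ring
  have htbnds := pvVal_bounds t htb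
  have hvc : pvVal (h :: t) = h * 10 ^ t.length + pvVal t := pvVal_cons h t
  have hfval : 0 ≤ pvVal f := hn
  have hpos : (0:Int) < 10 ^ t.length := by positivity
  have hh0 : 0 ≤ h := by nlinarith [htbnds.1, htbnds.2]
  rw [hg, hur]
  show aStrip (aNormGo (h.natAbs + 1) (h :: t)) = _
  rw [aNormGo_eq (h.natAbs + 1) h t hh0 (by omega)]
  have hrdb := rd_bounds h.toNat h hh0 le_rfl
  have hrdne : (bGo [] h).reverse ≠ [] := by
    by_cases h10 : 10 ≤ h
    · rw [bGo_step h h10]; simp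
    · rw [bGo_small h (by omega)]; simp
  have hall : ∀ y ∈ (bGo [] h).reverse ++ t, 0 ≤ y ∧ y < 10 := by
    intro y hy
    rcases List.mem_append.mp hy with hy | hy
    · exact hrdb y hy
    · exact htb y hy
  rw [aStrip_eq _ hall (by simp [hrdne])]
  congr 2
  rw [pvVal_append, rd_val h.toNat h hh0 le_rfl, ← hvc, hval]

-- the whole A pipeline on one operation branch, against B's digit emission
theorem branch_eq (val1 val2 : List Int) (op : Int → Int → Int) (n : Int)
    (hlenpos : 0 < val1.length ∨ 0 < val2.length)
    (hzip : pvVal (List.zipWith op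
        (if val1.length > val2.length then val1
         else List.replicate (val2.length - val1.length) 0 ++ val1)
        (if val1.length > val2.length then List.replicate (val1.length - val2.length) 0 ++ val2
         else val2)) = n)
    (hn : 0 ≤ n) :
    (match
      aCarryGo
        (List.foldl (fun f i => f ++
            [op ((if val1.length > val2.length then val1
                  else List.replicate (val2.length - val1.length) 0 ++ val1).getD i 0)
               ((if val1.length > val2.length then List.replicate (val1.length - val2.length) 0 ++ val2
                  else val2).getD i 0)]) []
          (List.range (if val1.length > val2.length then val1.length else val2.length)))
        ((List.foldl (fun f i => f ++
            [op ((if val1.length > val2.length then val1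
                  else List.replicate (val2.length - val1.length) 0 ++ val1).getD i 0)
               ((if val1.length > val2.length then List.replicate (val1.length - val2.length) 0 ++ val2
                  else val2).getD i 0)]) []
          (List.range (if val1.length > val2.length then val1.length else val2.length))).length - 1) with
     | [] => ([] : List Int)
     | h :: t => aStrip (aNormGo (h.natAbs + 1) (h :: t))) = (bGo [] n).reverse := by
  set v1' := if val1.length > val2.length then val1
             else List.replicate (val2.length - val1.length) 0 ++ val1 with hv1
  set v2' := if val1.length > val2.length then List.replicate (val1.length - val2.length) 0 ++ val2
             else val2 with hv2
  set len := if val1.length > val2.length then val1.length else val2.length with hlen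
  have h1 : v1'.length = len := by
    rw [hv1, hlen]
    by_cases hc : val1.length > val2.length
    · simp [hc]
    · simp [hc]; omega
  have h2 : v2'.length = len := by
    rw [hv2, hlen]
    by_cases hc : val1.length > val2.length
    · simp [hc]; omega
    · simp [hc]
  rw [build_eq_zipWith op v1' v2' len h1 h2]
  have hlpos : 0 < len := by
    rw [hlen]
    rcases hlenpos with h | h <;> by_cases hc : val1.length > val2.length <;> simp [hc] <;> omega
  have hfne : List.zipWith op v1' v2' ≠ [] := by
    have : (List.zipWith op v1' v2').length = len := by
      rw [List.length_zipWith, h1, h2, min_self]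
    intro hc
    rw [hc] at this
    simp at this
    omega
  rw [core_eq _ hfne (by rw [hzip]; exact hn), hzip]

-- ===== VERDICT (by name: the statement is the Claim_ definition above) =====
theorem karatsuba_add_sub_spec : Claim_equal_karatsuba_add_sub := by
  intro val1 val2 operation _ hpre
  unfold Spec_karatsuba_add_sub
  obtain ⟨hne, hop⟩ := hpre
  have hlenpos : 0 < val1.length ∨ 0 < val2.length := by
    rcases hne with h | h
    · exact Or.inl (List.length_pos_iff.mpr h)
    · exact Or.inr (List.length_pos_iff.mpr h)
  rcases hop with ⟨hop, hv⟩ | ⟨hop, hv⟩ <;> subst hop <;>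
    simp only [karatsuba_add_sub, karatsuba_add_sub_alt]
  · rw [if_pos (show (("add":String) == "add") = true from rfl)]
    have hzv : pvVal (List.zipWith (· + ·)
        (if val1.length > val2.length then val1
         else List.replicate (val2.length - val1.length) 0 ++ val1)
        (if val1.length > val2.length then List.replicate (val1.length - val2.length) 0 ++ val2
         else val2)) = pvVal val1 + pvVal val2 := by
      by_cases hc : val1.length > val2.length
      · rw [if_pos hc, if_pos hc, pvVal_zipWith_add _ _ (by simp; omega),
            pvVal_replicate_zero]
      · rw [if_neg hc, if_neg hc, pvVal_zipWith_add _ _ (by simp; omega),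
            pvVal_replicate_zero]
    exact branch_eq val1 val2 (· + ·) (pvVal val1 + pvVal val2) hlenpos hzv hv
  · rw [if_neg (show ¬ ((("sub":String) == "add") = true) from by decide),
        if_pos (show (("sub":String) == "sub") = true from rfl)]
    have hzv : pvVal (List.zipWith (· - ·)
        (if val1.length > val2.length then val1
         else List.replicate (val2.length - val1.length) 0 ++ val1)
        (if val1.length > val2.length then List.replicate (val1.length - val2.length) 0 ++ val2
         else val2)) = pvVal val1 - pvVal val2 := by
      by_cases hc : val1.length > val2.length
      · rw [if_pos hc, if_pos hc, pvVal_zipWith_sub _ _ (by simp; omega),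
            pvVal_replicate_zero]
      · rw [if_neg hc, if_neg hc, pvVal_zipWith_sub _ _ (by simp; omega),
            pvVal_replicate_zero]
    exact branch_eq val1 val2 (· - ·) (pvVal val1 - pvVal val2) hlenpos hzv hv
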